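-- pv_equiv track=rewrite | github.com/FATESAIKOU/IoTSFC | src/ServiceHelperLib/RLAgent.py | RefineRandomID
-- ===== SOURCE A (Python) =====
-- def RefineRandomID(random_id, filtered_list):
--     real_id = random_id
--
--     for i in sorted(filtered_list):
--         if real_id >= i:
--             real_id += 1
--         else:
--             break
--
--     return real_id
-- ===== SOURCE B (Python) =====
-- def RefineRandomID(random_id, filtered_list):
--     # Least-fixpoint formulation: the answer is the smallest r >= random_id with
--     # r == random_id + |{x in filtered_list : x <= r}|; Kleene iteration reaches it
--     # without sorting the list at all.
--     r = random_id
--     while True: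
--         nr = random_id + sum(1 for x in filtered_list if x <= r)
--         if nr == r:
--             return r
--         r = nr
-- ===== Notes on version B (the rewrite author's own statement) =====
-- stated objective: alternative
-- what changed: A sorts the list and scans it with a break, incrementing per blocked slot; B never sorts: it iterates r <- random_id + count(x <= r) over the unsorted list until the least fixpoint is reached.
import Mathlib
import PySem

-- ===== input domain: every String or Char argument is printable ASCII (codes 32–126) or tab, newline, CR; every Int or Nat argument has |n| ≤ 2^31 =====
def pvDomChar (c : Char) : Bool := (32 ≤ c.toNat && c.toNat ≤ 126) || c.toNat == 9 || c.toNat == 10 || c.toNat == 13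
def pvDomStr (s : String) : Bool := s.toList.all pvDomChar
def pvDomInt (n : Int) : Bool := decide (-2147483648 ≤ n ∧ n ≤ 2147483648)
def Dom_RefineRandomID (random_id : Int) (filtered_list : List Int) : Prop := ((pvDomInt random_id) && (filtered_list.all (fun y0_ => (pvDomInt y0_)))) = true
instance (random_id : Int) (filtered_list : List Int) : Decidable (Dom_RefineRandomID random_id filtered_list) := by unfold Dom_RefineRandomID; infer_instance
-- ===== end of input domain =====

-- B replaces sort-then-scan-with-break by an unsorted Kleene iteration of
-- r ↦ random_id + |{x : x ≤ r}| to the least fixpoint (objective: alternative algorithm).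

-- ===== PORT A =====
-- the for-loop over sorted(filtered_list) with break
def pvLoopA (real_id : Int) : List Int → Int
  | [] => real_id
  | i :: rest => if real_id ≥ i then pvLoopA (real_id + 1) rest else real_id

def RefineRandomID (random_id : Int) (filtered_list : List Int) : Int :=
  pvLoopA random_id (PySem.List.sorted filtered_list (fun x => x) false)

-- ===== PORT B =====
-- sum(1 for x in filtered_list if x <= r)
def pvCntB (filtered_list : List Int) (r : Int) : Int :=
  (filtered_list.countP (fun x => decide (x ≤ r)) : Int)

-- the while-True loop of Source B; the Nat argument is fuel for totality only
-- (length+1 steps always suffice, proved below)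
def pvIterB (random_id : Int) (filtered_list : List Int) : Int → Nat → Int
  | r, 0 => r
  | r, fuel+1 =>
    let nr := random_id + pvCntB filtered_list r
    if nr = r then r else pvIterB random_id filtered_list nr fuel

def RefineRandomID_alt (random_id : Int) (filtered_list : List Int) : Int :=
  pvIterB random_id filtered_list random_id (filtered_list.length + 1)

-- ===== PRECONDITION & SPEC =====
def Spec_RefineRandomID (random_id : Int) (filtered_list : List Int) (out : Int) : Prop := out = RefineRandomID_alt random_id filtered_list
instance (random_id : Int) (filtered_list : List Int) (out : Int) : Decidable (Spec_RefineRandomID random_id filtered_list out) := by unfold Spec_RefineRandomID; infer_instance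

-- ===== CLAIM (what is proved, stated in full; the proofs are below) =====
def Claim_equal_RefineRandomID : Prop := ∀ (random_id : Int) (filtered_list : List Int), Dom_RefineRandomID random_id filtered_list → Spec_RefineRandomID random_id filtered_list (RefineRandomID random_id filtered_list)

-- ===== LEMMAS AND PROOFS =====

-- A's loop never decreases the id
theorem pvLoopA_ge (rid : Int) (s : List Int) : rid ≤ pvLoopA rid s := by
  induction s generalizing rid with
  | nil => simp [pvLoopA]
  | cons i rest ih =>
    simp only [pvLoopA]
    split
    · have := ih (rid + 1); omega
    · omega

-- the count is monotone in r
theorem pvCntB_mono (l : List Int) {r r' : Int} (h : r ≤ r') :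
    pvCntB l r ≤ pvCntB l r' := by
  unfold pvCntB
  have := List.countP_mono_left (l := l)
    (p := fun x => decide (x ≤ r)) (q := fun x => decide (x ≤ r'))
    (fun x _ hx => by simp only [decide_eq_true_eq] at *; omega)
  omega

theorem pvCntB_nonneg (l : List Int) (r : Int) : 0 ≤ pvCntB l r := by
  unfold pvCntB; positivity

theorem pvCntB_le_length (l : List Int) (r : Int) : pvCntB l r ≤ l.length := by
  unfold pvCntB
  have := List.countP_le_length (l := l) (p := fun x => decide (x ≤ r))
  omega

-- A's result is a fixpoint of r ↦ rid + |{x ∈ s : x ≤ r}| (s sorted)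
theorem pvLoopA_fix (rid : Int) (s : List Int) (hs : s.Pairwise (fun a b => a ≤ b)) :
    pvLoopA rid s = rid + pvCntB s (pvLoopA rid s) := by
  induction s generalizing rid with
  | nil => simp [pvLoopA, pvCntB]
  | cons i rest ih =>
    rcases List.pairwise_cons.mp hs with ⟨hall, hrest⟩
    simp only [pvLoopA]
    split
    · rename_i h
      have hge := pvLoopA_ge (rid + 1) rest
      have hIH := ih (rid + 1) hrest
      have hi : i ≤ pvLoopA (rid + 1) rest := by omega
      simp only [pvCntB, List.countP_cons, hi, decide_true, if_pos] at *
      push_cast at *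
      omega
    · rename_i h
      have hz : (i :: rest).countP (fun x => decide (x ≤ rid)) = 0 := by
        rw [List.countP_eq_zero]
        intro x hx
        simp only [decide_eq_true_eq]
        rcases List.mem_cons.mp hx with rfl | hx'
        · omega
        · have := hall x hx'; omega
      simp [pvCntB, hz]
  
-- A's result is below every prefixpoint ≥ rid (leastness)
theorem pvLoopA_least (rid r : Int) (s : List Int) (h1 : rid ≤ r)
    (h2 : rid + pvCntB s r ≤ r) : pvLoopA rid s ≤ r := by
  induction s generalizing rid with
  | nil => simpa [pvLoopA] using h1
  | cons i rest ih =>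
    simp only [pvLoopA]
    split
    · rename_i h
      have hi : i ≤ r := by omega
      simp only [pvCntB, List.countP_cons, hi, decide_true, if_pos] at h2
      have hnn := pvCntB_nonneg rest r
      unfold pvCntB at hnn
      push_cast at h2
      exact ih (rid + 1) (by omega) (by unfold pvCntB; omega)
    · exact h1

-- the Kleene iteration reaches the least fixpoint
theorem pvIterB_conv (rid : Int) (l : List Int) (rstar : Int)
    (hfix : rstar = rid + pvCntB l rstar)
    (hleast : ∀ q, rid ≤ q → rid + pvCntB l q ≤ q → rstar ≤ q) :
    ∀ (fuel : Nat) (r : Int), rid ≤ r → r ≤ rid + pvCntB l r → r ≤ rstar →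
      (rstar - r).toNat < fuel → pvIterB rid l r fuel = rstar := by
  intro fuel
  induction fuel with
  | zero => intro r _ _ _ h; omega
  | succ fuel ih =>
    intro r h0 h1 h2 h3
    simp only [pvIterB]
    split
    · rename_i heq
      have := hleast r h0 (le_of_eq heq)
      omega
    · rename_i hne
      have hlt : r < rid + pvCntB l r := lt_of_le_of_ne h1 (fun h => hne h.symm)
      have hm1 := pvCntB_mono l (le_of_lt hlt)
      have hm2 := pvCntB_mono l h2
      exact ih (rid + pvCntB l r) (by omega) (by omega) (by omega) (by omega)

-- ===== VERDICT (by name: the statement is the Claim_ definition above) =====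
theorem RefineRandomID_spec : Claim_equal_RefineRandomID := by
  unfold Claim_equal_RefineRandomID
  intro rid l _
  unfold Spec_RefineRandomID RefineRandomID RefineRandomID_alt
  have hperm : (PySem.List.sorted l (fun x => x) false).Perm l := PySem.List.sorted_perm ..
  have hcnt : ∀ r, pvCntB (PySem.List.sorted l (fun x => x) false) r = pvCntB l r := by
    intro r; unfold pvCntB; rw [hperm.countP_eq]
  have hpw : (PySem.List.sorted l (fun x => x) false).Pairwise (fun a b => a ≤ b) :=
    PySem.List.sorted_pairwise ..
  set R := pvLoopA rid (PySem.List.sorted l (fun x => x) false) with hR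
  have hge : rid ≤ R := pvLoopA_ge ..
  have hfix : R = rid + pvCntB l R := by
    rw [← hcnt]; exact pvLoopA_fix rid _ hpw
  have hleast : ∀ q, rid ≤ q → rid + pvCntB l q ≤ q → R ≤ q := by
    intro q hq h; exact pvLoopA_least rid q _ hq (by rw [hcnt]; exact h)
  have hlen := pvCntB_le_length l R
  refine (pvIterB_conv rid l R hfix hleast (l.length + 1) rid le_rfl ?_ hge ?_).symm
  · have := pvCntB_nonneg l rid; omega
  · omega
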